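-- pv_equiv track=rewrite | github.com/rohitagarwal45/pythonProject | m+n.py | movToEnd
-- ===== SOURCE A (Python) =====
-- NA = -1
--
-- def movToEnd(a):
--
--     i = 0
--     j = len(a) - 1
--
--     for i in range(len(a)-1, -1, -1):
--         if a[i]!= NA:
--             a[j] = a[i]
--             j -= 1
--
--     return j
-- ===== SOURCE B (Python) =====
-- NA = -1
--
-- def movToEnd(a):
--     non_na = [x for x in a if x != NA]
--     k = len(a) - len(non_na)
--     a[k:] = non_na
--     return k - 1
-- ===== Notes on version B (the rewrite author's own statement) =====
-- stated objective: simpler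
-- what changed: Replaces A's right-to-left two-pointer in-place compaction loop with a filter (collect the non-NA elements), a slice assignment a[k:] = non_na, and the closed-form return count(NA) - 1.
import Mathlib
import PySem

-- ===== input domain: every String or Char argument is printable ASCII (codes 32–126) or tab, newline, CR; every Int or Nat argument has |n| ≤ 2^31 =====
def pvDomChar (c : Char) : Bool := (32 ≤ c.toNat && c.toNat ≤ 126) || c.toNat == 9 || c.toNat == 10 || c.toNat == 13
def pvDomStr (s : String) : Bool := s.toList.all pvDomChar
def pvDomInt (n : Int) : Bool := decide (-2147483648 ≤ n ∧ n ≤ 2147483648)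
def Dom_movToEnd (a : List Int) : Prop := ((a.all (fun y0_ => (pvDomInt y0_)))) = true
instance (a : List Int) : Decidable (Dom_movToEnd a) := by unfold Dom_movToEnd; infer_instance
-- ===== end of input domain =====

-- B replaces A's right-to-left two-pointer in-place compaction with filter + closed-form
-- index arithmetic (simpler); B performs the same observable mutation of `a` as A, and the
-- equivalence proved here is about the RETURN value.
-- ===== PORT A =====
def pvNA : Int := -1

def movToEnd (a : List Int) : Int :=
  -- for i in range(len(a)-1, -1, -1): if a[i] != NA: a[j] = a[i]; j -= 1
  -- (the read index i and the write index j are always in range: j starts at len-1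
  --  and never drops below the current i, so pyGetD's default and .toNat never matter)
  let st := (PySem.List.pyRange ((a.length : Int) - 1) (-1) (-1)).foldl
    (fun (st : List Int × Int) i =>
      let v := PySem.List.pyGetD st.1 i 0
      if v ≠ pvNA then (st.1.set st.2.toNat v, st.2 - 1) else st)
    (a, (a.length : Int) - 1)
  st.2

-- ===== PORT B =====
def movToEnd_alt (a : List Int) : Int :=
  let nonNa := a.filter (fun x => x ≠ pvNA)
  let k : Int := (a.length : Int) - (nonNa.length : Int)
  k - 1

-- ===== PRECONDITION & SPEC =====
def Spec_movToEnd (a : List Int) (out : Int) : Prop := out = movToEnd_alt a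
instance (a : List Int) (out : Int) : Decidable (Spec_movToEnd a out) := by unfold Spec_movToEnd; infer_instance

-- ===== CLAIM (what is proved, stated in full; the proofs are below) =====
def Claim_equal_movToEnd : Prop := ∀ (a : List Int), Dom_movToEnd a → Spec_movToEnd a (movToEnd a)

-- ===== LEMMAS AND PROOFS =====

-- ===== VERDICT (by name: the statement is the Claim_ definition above) =====
-- Invariant: after scanning indices n-1..0, j has dropped by the number of non-NA
-- entries among the first n elements of the ORIGINAL list a (writes happen at j, which
-- never drops below the indices still to be read, so reads always see a's values).
lemma movToEnd_loop_inv (a : List Int) : ∀ (n : Nat) (xs : List Int) (j : Int),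
    (n : Int) - 1 ≤ j → n ≤ xs.length → n ≤ a.length →
    (∀ k : Nat, k < n → xs.getD k 0 = a.getD k 0) →
    ((PySem.List.pyRange ((n : Int) - 1) (-1) (-1)).foldl
      (fun (st : List Int × Int) i =>
        let v := PySem.List.pyGetD st.1 i 0
        if v ≠ pvNA then (st.1.set st.2.toNat v, st.2 - 1) else st)
      (xs, j)).2
    = j - ((a.take n).countP (fun x => x ≠ pvNA)) := by
  intro n
  induction n with
  | zero =>
    intro xs j _ _ _ _
    rw [PySem.List.pyRange_neg_one_eq_nil (by norm_num)]
    simp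
  | succ n ih =>
    intro xs j hj hxs ha hagree
    have hn : ((n + 1 : Nat) : Int) - 1 = (n : Int) := by push_cast; ring
    rw [hn, PySem.List.pyRange_neg_one_cons (by omega), List.foldl_cons]
    have hlt : n < a.length := by omega
    have hread : PySem.List.pyGetD xs (n : Int) 0 = a.getD n 0 := by
      rw [PySem.List.pyGetD_natCast]
      exact hagree n (Nat.lt_succ_self n)
    have htake : a.take (n + 1) = a.take n ++ [a.getD n 0] := by
      rw [List.take_add_one, List.getD_eq_getElem?_getD, List.getElem?_eq_getElem hlt]
      rfl
    have hcnt : (((a.take (n + 1)).countP (fun x => x ≠ pvNA)) : Int)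
        = (((a.take n).countP (fun x => x ≠ pvNA)) : Int)
          + (if a.getD n 0 = pvNA then 0 else 1) := by
      rw [htake, List.countP_append]
      by_cases hv : a.getD n 0 = pvNA <;> simp [pvNA]
    dsimp only
    rw [hread]
    by_cases hv : a.getD n 0 = pvNA
    all_goals have hv2 := hv; rw [List.getD_eq_getElem?_getD] at hv2
    · -- a[n] == NA: state unchanged, count unchanged
      rw [if_neg (by simp [hv2])]
      rw [ih xs j (by omega) (by omega) (by omega) (fun k hk => hagree k (by omega))]
      rw [hcnt, if_pos hv]
      ring
    · -- a[n] != NA: write at position j ≥ n (above every index still to be read)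
      rw [if_pos (by simp [hv2])]
      have hjn : (n : Int) ≤ j := by omega
      rw [ih (xs.set j.toNat (a.getD n 0)) (j - 1) (by omega) (by simp; omega) (by omega)
        (fun k hk => by
          rw [List.getD_eq_getElem?_getD, List.getElem?_set_ne (by omega),
            ← List.getD_eq_getElem?_getD]
          exact hagree k (by omega))]
      rw [hcnt, if_neg hv]
      ring

theorem movToEnd_spec : Claim_equal_movToEnd := by
  intro a _
  unfold Spec_movToEnd movToEnd movToEnd_alt
  have h := movToEnd_loop_inv a a.length a ((a.length : Int) - 1)
    (by omega) (le_refl _) (le_refl _) (fun k _ => rfl)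
  simp only [List.take_length] at h
  rw [h, List.countP_eq_length_filter]
  dsimp only
  omega
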